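-- pv_equiv track=rewrite | github.com/eastmountaincode/oligo-design-tool | oligo_designer_v3_2026_04_15/backend/oligo_designer.py | _count_kmer_conflicts
-- ===== SOURCE A (Python) =====
-- KMER_SIZE_FOR_XHYB = 10
--
-- def _count_kmer_conflicts(
--     seq: str, placed: set[str], k: int = KMER_SIZE_FOR_XHYB
-- ) -> int:
--     """Number of distinct k-mers in seq that already appear in `placed`."""
--     if not placed or len(seq) < k:
--         return 0
--     s = seq.upper()
--     matches = set()
--     for i in range(len(s) - k + 1):
--         kmer = s[i:i + k]
--         if kmer in placed:
--             matches.add(kmer)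
--     return len(matches)
-- ===== SOURCE B (Python) =====
-- KMER_SIZE_FOR_XHYB = 10
--
--
-- def _count_kmer_conflicts(
--     seq: str, placed: set[str], k: int = KMER_SIZE_FOR_XHYB
-- ) -> int:
--     """Number of distinct k-mers in seq that already appear in `placed`."""
--     s = seq.upper()
--     return sum(1 for p in placed if len(p) == k and p in s)
-- ===== Notes on version B (the rewrite author's own statement) =====
-- stated objective: alternative
-- what changed: B inverts the traversal: instead of sliding a window over seq and membership-testing every k-mer against placed while accumulating a match set, B scans the placed set once and counts the elements of length k that occur as substrings of seq.upper() via Python's substring search, with no window loop, no match set and no guards.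
-- outside the precondition, e.g. on _count_kmer_conflicts('ABC', {''}, -1): A returns 1, B returns 0
import Mathlib
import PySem

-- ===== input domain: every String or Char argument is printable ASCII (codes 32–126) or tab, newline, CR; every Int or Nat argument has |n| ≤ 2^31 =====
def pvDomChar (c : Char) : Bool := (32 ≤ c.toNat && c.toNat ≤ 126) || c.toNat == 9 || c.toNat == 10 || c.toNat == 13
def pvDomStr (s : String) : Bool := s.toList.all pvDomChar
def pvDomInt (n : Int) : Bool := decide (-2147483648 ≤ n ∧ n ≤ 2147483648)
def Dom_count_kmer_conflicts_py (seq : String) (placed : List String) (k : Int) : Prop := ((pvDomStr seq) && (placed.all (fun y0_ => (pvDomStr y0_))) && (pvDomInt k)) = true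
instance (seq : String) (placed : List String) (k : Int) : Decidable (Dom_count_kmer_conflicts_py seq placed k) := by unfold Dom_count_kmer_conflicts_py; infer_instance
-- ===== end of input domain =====

-- B inverts the traversal: it scans the `placed` set once and counts its length-k elements
-- occurring as substrings of seq.upper(), instead of A's sliding-window loop over seq that
-- membership-tests each k-mer and accumulates a match set (alternative; measured faster).

-- ===== PORT A =====
def count_kmer_conflicts_py (seq : String) (placed : List String) (k : Int) : Int :=
  if placed = [] ∨ PySem.Str.len seq < k then 0
  else
    let s := PySem.Str.upper seq
    let matched : PySem.Set String :=
      (PySem.List.pyRange 0 (PySem.Str.len s - k + 1) 1).foldl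
        (fun m i =>
          let kmer := PySem.Str.slice s (some i) (some (i + k))
          if PySem.Set.contains placed kmer then PySem.Set.add m kmer else m)
        PySem.Set.empty
    PySem.Set.len matched

-- ===== PORT B =====
def count_kmer_conflicts_py_alt (seq : String) (placed : List String) (k : Int) : Int :=
  let s := PySem.Str.upper seq
  placed.foldl
    (fun acc p =>
      if (PySem.Str.len p == k) && PySem.Str.isIn p s then acc + 1 else acc) 0

-- ===== PRECONDITION & SPEC =====
-- Pre_ keeps the natural domain of the function: `placed` is typed set[str] in Python, so the
-- association of the List argument to a set requires distinct elements (placed.Nodup); and a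
-- k-mer size is nonnegative (0 ≤ k) — for negative k A's returned values are artifacts of
-- Python's negative slice-bound clamping (it can count '' or length-(len(seq)+k) slices),
-- which B's natural placed-scan does not reproduce (it returns 0 there).
def Pre_count_kmer_conflicts_py (seq : String) (placed : List String) (k : Int) : Prop :=
  0 ≤ k ∧ placed.Nodup
instance (seq : String) (placed : List String) (k : Int) : Decidable (Pre_count_kmer_conflicts_py seq placed k) := by unfold Pre_count_kmer_conflicts_py; infer_instance

def pvWitness_count_kmer_conflicts_py : String × List String × Int := ("ACgtAC", ["AC", "GT", "TT"], 2)

def Spec_count_kmer_conflicts_py (seq : String) (placed : List String) (k : Int) (out : Int) : Prop := out = count_kmer_conflicts_py_alt seq placed k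
instance (seq : String) (placed : List String) (k : Int) (out : Int) : Decidable (Spec_count_kmer_conflicts_py seq placed k out) := by unfold Spec_count_kmer_conflicts_py; infer_instance

-- ===== CLAIM (what is proved, stated in full; the proofs are below) =====
def Claim_equal_count_kmer_conflicts_py : Prop := ∀ (seq : String) (placed : List String) (k : Int), Dom_count_kmer_conflicts_py seq placed k → Pre_count_kmer_conflicts_py seq placed k → Spec_count_kmer_conflicts_py seq placed k (count_kmer_conflicts_py seq placed k)

-- ===== LEMMAS AND PROOFS =====

-- A's guarded accumulation loop is the fold of `Set.add` over the filtered list.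
theorem pv_foldl_guard_add (placed : List String) :
    ∀ (l : List String) (m : PySem.Set String),
      l.foldl (fun m km => if PySem.Set.contains placed km then PySem.Set.add m km else m) m
        = (l.filter (fun km => PySem.Set.contains placed km)).foldl PySem.Set.add m := by
  intro l
  induction l with
  | nil => intro m; rfl
  | cons x xs ih =>
      intro m
      simp only [List.foldl_cons, List.filter_cons]
      by_cases h : PySem.Set.contains placed x = true
      · rw [if_pos h, if_pos h, ih, List.foldl_cons]
      · rw [if_neg h, if_neg h, ih]

-- dedup-keeping-first commutes with filtering.
theorem pv_ofList_filter (p : String → Bool) :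
    ∀ (l : List String),
      PySem.Set.ofList (l.filter p) = List.filter p (PySem.Set.ofList l) := by
  intro l
  induction l using List.reverseRecOn with
  | nil => rfl
  | append_singleton xs x ih =>
      rw [List.filter_append, PySem.Set.ofList_append_singleton, PySem.Set.add_eq_ite]
      by_cases hx : p x = true
      · simp only [List.filter_cons, hx, if_true, List.filter_nil]
        rw [PySem.Set.ofList_append_singleton, PySem.Set.add_eq_ite, ih]
        by_cases hmem : x ∈ PySem.Set.ofList xs
        · rw [if_pos hmem, if_pos (by exact List.mem_filter.mpr ⟨hmem, hx⟩)]
        · rw [if_neg hmem,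
            if_neg (fun hc => hmem (List.mem_filter.mp hc).1), List.filter_append]
          simp [hx]
      · simp only [List.filter_cons, hx, Bool.false_eq_true, if_false, List.filter_nil,
          List.append_nil, ih]
        split_ifs <;> simp [List.filter_append, hx]

-- a list is a length-K contiguous window of cs iff it is an infix of cs of length K.
theorem pv_window_iff (cs : List Char) (K : Nat) (x : List Char) :
    (∃ i : Nat, i + K ≤ cs.length ∧ x = (cs.drop i).take K)
      ↔ (x.length = K ∧ x <:+: cs) := by
  constructor
  · rintro ⟨i, hle, rfl⟩
    refine ⟨by simp only [List.length_take, List.length_drop]; omega, ?_⟩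
    exact (((cs.drop i).take_prefix K).isInfix).trans ((cs.drop_suffix i).isInfix)
  · rintro ⟨hlen, t, u, rfl⟩
    refine ⟨t.length, by simp only [List.length_append]; omega, ?_⟩
    rw [List.append_assoc, List.drop_left, List.take_left' hlen]

-- the B-side test characterises membership in A's k-mer window list (0 ≤ k ≤ len s).
theorem pv_mem_kmers_iff (s : String) (k : Int) (hk : 0 ≤ k)
    (hkn : k ≤ PySem.Str.len s) (x : String) :
    (x ∈ (PySem.List.pyRange 0 (PySem.Str.len s - k + 1) 1).map
        (fun i => PySem.Str.slice s (some i) (some (i + k))))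
      ↔ ((PySem.Str.len x == k) && PySem.Str.isIn x s) = true := by
  have hlen : PySem.Str.len s = (s.toList.length : Int) := by simp [PySem.Str.len_eq]
  have hx : PySem.Str.len x = (x.toList.length : Int) := by simp [PySem.Str.len_eq]
  rw [Bool.and_eq_true, beq_iff_eq, PySem.Str.isIn_iff_infix, List.mem_map, hx, hlen]
  rw [hlen] at hkn
  constructor
  · rintro ⟨i, hi, rfl⟩
    rw [PySem.List.mem_pyRange_one] at hi
    have hslice : (PySem.Str.slice s (some i) (some (i + k))).toList
        = (s.toList.drop i.toNat).take k.toNat := by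
      rw [PySem.Str.toList_slice, PySem.Chars.slice_eq_listSlice,
        PySem.List.slice_toNat s.toList hi.1 (by omega)]
      congr 1
      omega
    have hwin := (pv_window_iff s.toList k.toNat
        ((PySem.Str.slice s (some i) (some (i + k))).toList)).mp
      ⟨i.toNat, by omega, hslice⟩
    exact ⟨by rw [hwin.1]; omega, hwin.2⟩
  · rintro ⟨hxl, hinf⟩
    obtain ⟨j, hj, hxe⟩ := (pv_window_iff s.toList k.toNat x.toList).mpr ⟨by omega, hinf⟩
    refine ⟨(j : Int), ?_, ?_⟩
    · rw [PySem.List.mem_pyRange_one]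
      exact ⟨by positivity, by omega⟩
    · apply String.toList_inj.mp
      rw [PySem.Str.toList_slice, PySem.Chars.slice_eq_listSlice,
        PySem.List.slice_toNat s.toList (by positivity) (by omega), hxe]
      congr 1 <;> omega

-- A, away from its early returns, counts the distinct window k-mers that lie in `placed`.
theorem pv_A_eq (seq : String) (placed : List String) (k : Int)
    (h : ¬(placed = [] ∨ PySem.Str.len seq < k)) :
    count_kmer_conflicts_py seq placed k
      = (((PySem.Set.ofList
            ((PySem.List.pyRange 0 (PySem.Str.len (PySem.Str.upper seq) - k + 1) 1).map
              (fun i => PySem.Str.slice (PySem.Str.upper seq) (some i) (some (i + k))))).filter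
          (fun km => PySem.Set.contains placed km)).length : Int) := by
  unfold count_kmer_conflicts_py
  rw [if_neg h, ← pv_ofList_filter, PySem.Set.ofList_eq_foldl, ← pv_foldl_guard_add,
    List.foldl_map]
  rfl

-- ===== VERDICT (by name: the statement is the Claim_ definition above) =====
theorem count_kmer_conflicts_py_spec : Claim_equal_count_kmer_conflicts_py := by
  intro seq placed k _ hpre
  obtain ⟨hk, hnd⟩ := hpre
  unfold Spec_count_kmer_conflicts_py count_kmer_conflicts_py_alt
  rw [PySem.List.foldl_if_add_one, zero_add, List.countP_eq_length_filter]
  by_cases h : placed = [] ∨ PySem.Str.len seq < k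
  · -- A's early return: B's count is 0 on the same inputs
    unfold count_kmer_conflicts_py
    rw [if_pos h]
    rcases h with h | h
    · subst h; simp
    · have hfil : placed.filter
          (fun p => (PySem.Str.len p == k) && PySem.Str.isIn p (PySem.Str.upper seq)) = [] := by
        rw [List.filter_eq_nil_iff]
        intro p _ hc
        rw [Bool.and_eq_true, beq_iff_eq, PySem.Str.isIn_iff_infix] at hc
        have h1 := hc.2.sublist.length_le
        have hup : (PySem.Str.upper seq).toList.length = seq.toList.length := by
          rw [PySem.Str.toList_upper, PySem.Chars.upper, List.length_map]
        have h2 : PySem.Str.len seq = (seq.toList.length : Int) := by simp [PySem.Str.len_eq]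
        have h3 : PySem.Str.len p = (p.toList.length : Int) := by simp [PySem.Str.len_eq]
        rw [h2] at h
        rw [h3] at hc
        omega
      rw [hfil]
      simp
  · -- main case: both filtered lists are nodup with equal membership, hence a permutation
    rw [pv_A_eq seq placed k h]
    push_neg at h
    obtain ⟨hpl, hkn⟩ := h
    have hkn' : k ≤ PySem.Str.len (PySem.Str.upper seq) := by
      have he : PySem.Str.len (PySem.Str.upper seq) = PySem.Str.len seq := by
        have hl : (PySem.Str.upper seq).toList.length = seq.toList.length := by
          rw [PySem.Str.toList_upper, PySem.Chars.upper, List.length_map]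
        have h1 : PySem.Str.len (PySem.Str.upper seq)
            = (((PySem.Str.upper seq).toList.length : Nat) : Int) := by
          simp [PySem.Str.len_eq]
        have h2 : PySem.Str.len seq = (seq.toList.length : Int) := by
          simp [PySem.Str.len_eq]
        rw [h1, h2, hl]
      omega
    have hperm :
        (List.filter (fun km => PySem.Set.contains placed km)
            (PySem.Set.ofList
              ((PySem.List.pyRange 0 (PySem.Str.len (PySem.Str.upper seq) - k + 1) 1).map
                (fun i => PySem.Str.slice (PySem.Str.upper seq) (some i) (some (i + k)))))).Perm
          (placed.filter
            (fun p => (PySem.Str.len p == k) && PySem.Str.isIn p (PySem.Str.upper seq))) := by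
      rw [List.perm_ext_iff_of_nodup
        (List.Nodup.filter _ (PySem.Set.nodup_ofList _)) (hnd.filter _)]
      intro a
      rw [List.mem_filter, List.mem_filter, PySem.Set.mem_ofList,
        pv_mem_kmers_iff _ k hk hkn' a]
      constructor
      · rintro ⟨hmem, hcont⟩
        exact ⟨(PySem.Set.contains_iff placed a).mp hcont, hmem⟩
      · rintro ⟨hmem, hcond⟩
        exact ⟨hcond, (PySem.Set.contains_iff placed a).mpr hmem⟩
    exact congrArg (fun n : Nat => (n : Int)) hperm.length_eq

-- (Pre_ witness sanity: Dom and Pre hold at the witness.)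
theorem pv_witness_ok :
    Dom_count_kmer_conflicts_py pvWitness_count_kmer_conflicts_py.1
        pvWitness_count_kmer_conflicts_py.2.1 pvWitness_count_kmer_conflicts_py.2.2
      ∧ Pre_count_kmer_conflicts_py pvWitness_count_kmer_conflicts_py.1
        pvWitness_count_kmer_conflicts_py.2.1 pvWitness_count_kmer_conflicts_py.2.2 := by
  decide
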